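-- pv_equiv track=rewrite | github.com/pypi-data/pypi-mirror-321 | packages/additional_difficulty/additional_difficulty-0.0.3-py3-none-any.whl/additional_difficulty/differences.py | difficulty_of_difference
-- ===== SOURCE A (Python) =====
-- import collections
--
-- def difficulty_of_difference(minuend: int, subtrahend: int, radix: int = 10, cache_size: int = 3) -> float:
--
--     cache: collections.deque[tuple[int, int, int]] = collections.deque([], maxlen=cache_size)
--
--     if minuend < subtrahend:
--         minuend, subtrahend = subtrahend, minuend
--
--     m, s = minuend, subtrahend
--
--
--     assert m >= s
--
--     borrow: int = 0
--     retval: int = 0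
--
--     result, multiplier = 0, 1
--
--     while s > 0 or borrow > 0:
--         m, r_m = divmod(m, radix)
--         s, r_s = divmod(s, radix)
--
--         tuple_ = (r_m, r_s, borrow)
--
--         r_m -= borrow
--
--         if r_s > r_m:
--             borrow = 1
--         else:
--             borrow = 0
--
--         if r_m == r_s:
--             # Zero difference
--             pass
--         elif r_s + 1 == radix:
--             # subtract 9 <=> add 10 & subtract 1
--             retval += 1
--         elif tuple_ in cache:
--             # Recall result of the same operation, recently done.
--             retval += 1
--         elif 2*r_s == r_m:
--             # Subtract half of self is not so hard.
--             retval += min(r_s, 2)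
--         elif r_m % 2 == 0 and r_s % 2 == 0:
--             # subtract 1 if both digits are even
--             retval += max(1, r_s - 1)
--         else:
--             # the borrowed-bit allows larger digits to be subtracted,
--             # don't add extra difficulty for the borrow.
--             retval += r_s
--             # min(r_m - r_s, r_s)
--
--
--         # Extra operation to add the borrow.
--         retval += borrow
--
--         cache.append(tuple_)
--
--         partial_sum_of_diff = radix*borrow + r_m - r_s
--         result += partial_sum_of_diff*multiplier
--
--
--         # Extra operation to store the borrowed bit
--         retval += borrow
--
--
--         multiplier *= radix
--
--     result += multiplier * m
--
--     assert result == minuend - subtrahend, f'{result=}, {m} - {s}, {borrow=}, {multiplier=}, {radix=}'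
--
--     return max(1, retval)
-- ===== SOURCE B (Python) =====
-- def difficulty_of_difference(minuend: int, subtrahend: int, radix: int = 10, cache_size: int = 3) -> float:
--     if minuend < subtrahend:
--         minuend, subtrahend = subtrahend, minuend
--
--     # pass 1: peel the digit columns, recording (r_m, r_s, incoming borrow)
--     m, s, borrow = minuend, subtrahend, 0
--     triples = []
--     while s > 0 or borrow > 0:
--         m, r_m = divmod(m, radix)
--         s, r_s = divmod(s, radix)
--         triples.append((r_m, r_s, borrow))
--         borrow = 1 if r_s > r_m - borrow else 0
--
--     # pass 2: score each recorded column, with a manual sliding window of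
--     # the previous up-to-cache_size columns (checked before the current is added)
--     retval = 0
--     window = []
--     for t in triples:
--         r_m, r_s, b = t
--         r_m -= b
--         nb = 1 if r_s > r_m else 0
--         if r_m == r_s:
--             pass
--         elif r_s + 1 == radix:
--             retval += 1
--         elif t in window:
--             retval += 1
--         elif 2 * r_s == r_m:
--             retval += min(r_s, 2)
--         elif r_m % 2 == 0 and r_s % 2 == 0:
--             retval += max(1, r_s - 1)
--         else:
--             retval += r_s
--         retval += 2 * nb
--         window.append(t)
--         if len(window) > cache_size:
--             window.pop(0)
--
--     # pass 3: reconstruct the difference from the recorded columns (sanity check)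
--     result, multiplier = 0, 1
--     for (r_m, r_s, b) in triples:
--         nb = 1 if r_s > r_m - b else 0
--         result += (radix * nb + (r_m - b) - r_s) * multiplier
--         multiplier *= radix
--     result += multiplier * m
--     assert result == minuend - subtrahend
--
--     return max(1, retval)
-- ===== Notes on version B (the rewrite author's own statement) =====
-- stated objective: alternative
-- what changed: A scores inline in one digit-peeling while-loop; B splits the work into passes: record the (r_m, r_s, borrow) column triples first, then score them against a manually maintained sliding window, then reconstruct the difference for the sanity check.
-- outside the precondition, e.g. on difficulty_of_difference(2, 3, -2, 3): A returns 2, B returns 2; on difficulty_of_difference(5, 3, 0, 3): A raises ZeroDivisionError, B raises ZeroDivisionError; on difficulty_of_difference(5, 3, -1, 3): A raises AssertionError, B raises AssertionError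
import Mathlib
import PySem

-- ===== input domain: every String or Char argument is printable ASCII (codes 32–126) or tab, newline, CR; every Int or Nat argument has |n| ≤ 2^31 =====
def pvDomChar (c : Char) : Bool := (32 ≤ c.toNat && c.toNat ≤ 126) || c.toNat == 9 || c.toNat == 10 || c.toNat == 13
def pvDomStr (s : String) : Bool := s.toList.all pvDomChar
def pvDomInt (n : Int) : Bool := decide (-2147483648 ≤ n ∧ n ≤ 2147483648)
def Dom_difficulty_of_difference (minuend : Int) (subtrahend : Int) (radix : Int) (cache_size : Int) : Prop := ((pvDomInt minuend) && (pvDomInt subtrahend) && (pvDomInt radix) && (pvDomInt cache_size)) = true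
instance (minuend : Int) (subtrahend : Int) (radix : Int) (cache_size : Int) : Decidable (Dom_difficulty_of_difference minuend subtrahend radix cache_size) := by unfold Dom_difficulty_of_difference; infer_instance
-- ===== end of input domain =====

-- B recomputes the same score in two passes (record the digit columns, then score
-- them against a manual sliding window) instead of A's single inline loop; objective:
-- alternative decomposition, same cost.

-- shared deque-append: both Pythons keep a window of the last `cache_size` triples
-- (collections.deque(maxlen=…) in A, append-then-pop(0) in B) — the identical operation
def windowPush (cache_size : Int) (w : List (Int × Int × Int)) (t : Int × Int × Int) :
    List (Int × Int × Int) :=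
  let w' := w ++ [t]
  if cache_size < (w'.length : Int) then w'.drop 1 else w'

-- ===== PORT A =====
-- A's single while-loop; `fuel` only makes the recursion total (the loop runs fewer
-- than M+2 iterations on every input Pre_ admits).  result/multiplier are threaded
-- exactly as Python does; the final `result += multiplier*m` and the assert are dead
-- for the return value (under Pre_ the assert always holds), so retval is returned.
def aLoop (radix cache_size : Int) :
    Nat → Int → Int → Int → Int → Int → Int → List (Int × Int × Int) → Int
  | 0, _, _, _, retval, _, _, _ => retval
  | Nat.succ fuel, m, s, borrow, retval, result, multiplier, cache =>
    if s > 0 ∨ borrow > 0 then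
      let m' := PySem.Int.floordiv m radix
      let r_m := PySem.Int.mod m radix
      let s' := PySem.Int.floordiv s radix
      let r_s := PySem.Int.mod s radix
      let t := (r_m, r_s, borrow)
      let r_m2 := r_m - borrow
      let borrow' : Int := if r_s > r_m2 then 1 else 0
      let retval1 :=
        if r_m2 = r_s then retval
        else if r_s + 1 = radix then retval + 1
        else if t ∈ cache then retval + 1
        else if 2 * r_s = r_m2 then retval + min r_s 2
        else if PySem.Int.mod r_m2 2 = 0 ∧ PySem.Int.mod r_s 2 = 0 then retval + max 1 (r_s - 1)
        else retval + r_s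
      let retval2 := retval1 + borrow'
      let cache' := windowPush cache_size cache t
      let result' := result + (radix * borrow' + r_m2 - r_s) * multiplier
      let retval3 := retval2 + borrow'
      let multiplier' := multiplier * radix
      aLoop radix cache_size fuel m' s' borrow' retval3 result' multiplier' cache'
    else retval

def difficulty_of_difference (minuend : Int) (subtrahend : Int) (radix : Int) (cache_size : Int) : Int :=
  let M := if minuend < subtrahend then subtrahend else minuend
  let S := if minuend < subtrahend then minuend else subtrahend
  let retval := aLoop radix cache_size (M.toNat + 2) M S 0 0 0 1 []
  max 1 retval

-- ===== PORT B =====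
-- pass 1 of Source B: peel the digit columns, recording (r_m, r_s, incoming borrow);
-- returns the recorded triples and the leftover high part of m
def p1 (radix : Int) : Nat → Int → Int → Int → List (Int × Int × Int) × Int
  | 0, m, _, _ => ([], m)
  | Nat.succ fuel, m, s, borrow =>
    if s > 0 ∨ borrow > 0 then
      let r_m := PySem.Int.mod m radix
      let r_s := PySem.Int.mod s radix
      let borrow' : Int := if r_s > r_m - borrow then 1 else 0
      let rest := p1 radix fuel (PySem.Int.floordiv m radix) (PySem.Int.floordiv s radix) borrow'
      ((r_m, r_s, borrow) :: rest.1, rest.2)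
    else ([], m)

-- pass 2 of Source B: score each recorded column against the sliding window
def p2 (radix cache_size : Int) :
    List (Int × Int × Int) → List (Int × Int × Int) → Int → Int
  | [], _, retval => retval
  | t :: ts, window, retval =>
    let r_m := t.1 - t.2.2
    let r_s := t.2.1
    let nb : Int := if r_s > r_m then 1 else 0
    let retval1 :=
      if r_m = r_s then retval
      else if r_s + 1 = radix then retval + 1
      else if t ∈ window then retval + 1
      else if 2 * r_s = r_m then retval + min r_s 2
      else if PySem.Int.mod r_m 2 = 0 ∧ PySem.Int.mod r_s 2 = 0 then retval + max 1 (r_s - 1)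
      else retval + r_s
    let retval2 := retval1 + 2 * nb
    p2 radix cache_size ts (windowPush cache_size window t) retval2

-- pass 3 of Source B: reconstruct the difference (feeds only the assert, dead for the output)
def p3 (radix : Int) : List (Int × Int × Int) → Int × Int
  | [] => (0, 1)
  | t :: ts =>
    let nb : Int := if t.2.1 > t.1 - t.2.2 then 1 else 0
    let rest := p3 radix ts
    ((radix * nb + (t.1 - t.2.2) - t.2.1) + radix * rest.1, radix * rest.2)

def difficulty_of_difference_alt (minuend : Int) (subtrahend : Int) (radix : Int) (cache_size : Int) : Int :=
  let M := if minuend < subtrahend then subtrahend else minuend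
  let S := if minuend < subtrahend then minuend else subtrahend
  let pr := p1 radix (M.toNat + 2) M S 0
  let retval := p2 radix cache_size pr.1 [] 0
  let _result := (p3 radix pr.1).1 + (p3 radix pr.1).2 * pr.2  -- assert omitted: always true under Pre_
  max 1 retval

-- ===== PRECONDITION & SPEC =====
-- Pre_ admits exactly the well-behaved inputs: with a negative operand or negative
-- cache_size A raises (AssertionError / ValueError); with radix < 2 and both operands
-- positive A usually hangs (radix 1), raises ZeroDivisionError (radix 0) or
-- AssertionError (negative radix), though for a few negative radixes the assert
-- happens to pass and A returns an accidental value (B returns the same value there).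
def Pre_difficulty_of_difference (minuend : Int) (subtrahend : Int) (radix : Int) (cache_size : Int) : Prop :=
  0 ≤ minuend ∧ 0 ≤ subtrahend ∧ 0 ≤ cache_size ∧ (2 ≤ radix ∨ min minuend subtrahend = 0)
instance (minuend : Int) (subtrahend : Int) (radix : Int) (cache_size : Int) : Decidable (Pre_difficulty_of_difference minuend subtrahend radix cache_size) := by unfold Pre_difficulty_of_difference; infer_instance

def pvWitness_difficulty_of_difference : Int × Int × Int × Int := (23, 7, 10, 3)

def Spec_difficulty_of_difference (minuend : Int) (subtrahend : Int) (radix : Int) (cache_size : Int) (out : Int) : Prop := out = difficulty_of_difference_alt minuend subtrahend radix cache_size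
instance (minuend : Int) (subtrahend : Int) (radix : Int) (cache_size : Int) (out : Int) : Decidable (Spec_difficulty_of_difference minuend subtrahend radix cache_size out) := by unfold Spec_difficulty_of_difference; infer_instance

-- ===== CLAIM (what is proved, stated in full; the proofs are below) =====
def Claim_equal_difficulty_of_difference : Prop := ∀ (minuend : Int) (subtrahend : Int) (radix : Int) (cache_size : Int), Dom_difficulty_of_difference minuend subtrahend radix cache_size → Pre_difficulty_of_difference minuend subtrahend radix cache_size → Spec_difficulty_of_difference minuend subtrahend radix cache_size (difficulty_of_difference minuend subtrahend radix cache_size)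

-- ===== LEMMAS AND PROOFS =====

-- A's inline loop equals B's record-then-score pair of passes, for any fuel and state
theorem aLoop_eq_p2_p1 (radix cache_size : Int) (fuel : Nat) :
    ∀ (m s borrow retval result multiplier : Int) (cache : List (Int × Int × Int)),
      aLoop radix cache_size fuel m s borrow retval result multiplier cache
        = p2 radix cache_size (p1 radix fuel m s borrow).1 cache retval := by
  induction fuel with
  | zero => intro m s borrow retval result multiplier cache; simp [aLoop, p1, p2]
  | succ n ih =>
    intro m s borrow retval result multiplier cache
    by_cases h : s > 0 ∨ borrow > 0
    · simp only [aLoop, p1, if_pos h, p2, ih]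
      congr 1
      ring
    · simp only [aLoop, p1, if_neg h, p2]

-- ===== VERDICT (by name: the statement is the Claim_ definition above) =====
theorem difficulty_of_difference_spec : Claim_equal_difficulty_of_difference := by
  intro minuend subtrahend radix cache_size _ _
  simp only [Spec_difficulty_of_difference, difficulty_of_difference,
    difficulty_of_difference_alt, aLoop_eq_p2_p1]
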